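-- pv_equiv track=rewrite | github.com/bhaskarborah/CMU-Python | Week_3/module3-assignment-solutions.py | nth_property_309
-- ===== SOURCE A (Python) =====
-- def has_digit(n, d):
--     while n > 0:
--         if d == n%10: return True
--         n //= 10
--     return False
--
-- def has_property_309(n):
--     fifth_power = n**5
--     for d in range(10):
--         if not has_digit(fifth_power, d):
--             return False
--     return True
--
-- def nth_property_309(n):
--     num_found = 0
--     guess = 0
--     while num_found <= n:
--         guess += 1
--         if has_property_309(guess):
--             num_found += 1
--     return guess
-- ===== SOURCE B (Python) =====
-- def _next_309(start):
--     g = start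
--     while True:
--         x = g ** 5
--         digits = set()
--         while x > 0:
--             digits.add(x % 10)
--             x //= 10
--         if len(digits) == 10:
--             return g
--         g += 1
--
-- def nth_property_309(n):
--     g = 0
--     for _ in range(n + 1):
--         g = _next_309(g + 1)
--     return g
-- ===== Notes on version B (the rewrite author's own statement) =====
-- stated objective: faster
-- what changed: The per-candidate check now builds the fifth power's digit set in a single mod/div pass and tests whether the set is complete, instead of rescanning the whole number once per decimal digit via has_digit; the outer counting while-loop is decomposed into a find-next-such-number helper applied once per count.
import Mathlib
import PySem

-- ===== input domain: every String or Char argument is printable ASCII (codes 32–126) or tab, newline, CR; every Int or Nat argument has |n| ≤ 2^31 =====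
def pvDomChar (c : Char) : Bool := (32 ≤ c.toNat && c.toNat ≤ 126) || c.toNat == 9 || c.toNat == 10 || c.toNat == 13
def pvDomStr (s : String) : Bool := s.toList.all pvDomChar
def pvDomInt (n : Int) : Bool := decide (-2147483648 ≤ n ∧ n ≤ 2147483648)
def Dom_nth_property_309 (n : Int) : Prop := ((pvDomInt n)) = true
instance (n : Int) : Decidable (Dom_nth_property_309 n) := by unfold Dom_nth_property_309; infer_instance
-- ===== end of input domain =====

-- B builds the fifth power's digit set in one %10-//10 pass and checks its size is 10
-- (A rescans the number once per digit via has_digit), and decomposes the outer count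
-- into a find-next-such-number helper applied n+1 times.


-- ===== PORT A =====
-- has_digit(n, d): scan the decimal digits of n for d
def hasDigitA (n d : Int) : Bool :=
  if _h : 0 < n then
    if d == PySem.Int.mod n 10 then true
    else hasDigitA (PySem.Int.floordiv n 10) d
  else false
termination_by n.toNat
decreasing_by
  rw [PySem.Int.floordiv_eq_ediv_of_pos (by omega : (0:Int) < 10)]; omega

-- has_property_309(n): every digit 0..9 occurs in n**5
def hasPropA (n : Int) : Bool :=
  let fifth := n ^ 5
  (PySem.List.pyRange 0 10 1).all (fun d => hasDigitA fifth d)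

-- A's while-loop, state (num_found, guess).  Python's loop is unbounded; the fuel
-- argument is only a totality guard: 309 * 10 ^ (n+1) is proved sufficient below
-- (309 * 10^m is a number whose fifth power uses all ten digits, for every m),
-- so the fuel-0 branch is never reached on any input.
def loopA (n : Int) (numFound guess : Nat) : Nat → Int
  | 0 => (guess : Int)
  | fuel + 1 =>
    if (numFound : Int) ≤ n then
      if hasPropA ((guess + 1 : Nat) : Int) then loopA n (numFound + 1) (guess + 1) fuel
      else loopA n numFound (guess + 1) fuel
    else (guess : Int)

def nth_property_309 (n : Int) : Int := loopA n 0 0 (309 * 10 ^ (n + 1).toNat)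

-- ===== PORT B =====
-- the inner while-loop of _next_309: collect the decimal digits of x into a set
def digitsB (x : Int) (digits : PySem.Set Int) : PySem.Set Int :=
  if _h : 0 < x then digitsB (PySem.Int.floordiv x 10) (PySem.Set.add digits (PySem.Int.mod x 10))
  else digits
termination_by x.toNat
decreasing_by
  rw [PySem.Int.floordiv_eq_ediv_of_pos (by omega : (0:Int) < 10)]; omega

-- len(digits) == 10 test of _next_309
def hasPropB (g : Int) : Bool := PySem.Set.len (digitsB (g ^ 5) PySem.Set.empty) == 10

-- _next_309(start): first g ≥ start whose fifth power uses all ten digits.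
-- Python's 'while True' is unbounded; the fuel is a totality guard proved
-- sufficient below, so the fuel-0 branch is never reached.
def nextFromB (g : Nat) : Nat → Nat
  | 0 => g
  | fuel + 1 => if hasPropB (g : Int) then g else nextFromB (g + 1) fuel

-- the for-loop of B: apply _next_309(g + 1) k times
def iterB : Nat → Nat → Nat
  | 0, g => g
  | k + 1, g => iterB k (nextFromB (g + 1) (309 * 10 ^ (g + 1)))

def nth_property_309_alt (n : Int) : Int := ((iterB (n + 1).toNat 0 : Nat) : Int)

-- ===== PRECONDITION & SPEC =====
def Spec_nth_property_309 (n : Int) (out : Int) : Prop := out = nth_property_309_alt n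
instance (n : Int) (out : Int) : Decidable (Spec_nth_property_309 n out) := by unfold Spec_nth_property_309; infer_instance

-- ===== CLAIM (what is proved, stated in full; the proofs are below) =====
def Claim_equal_nth_property_309 : Prop := ∀ (n : Int), Dom_nth_property_309 n → Spec_nth_property_309 n (nth_property_309 n)

-- ===== LEMMAS AND PROOFS =====

-- ---- unfolding lemmas for A's digit scan ----
theorem hasDigitA_base (x d : Int) (h0 : 0 < x) (hd : d = PySem.Int.mod x 10) :
    hasDigitA x d = true := by
  unfold hasDigitA
  simp [h0, hd]

theorem hasDigitA_up (x d : Int) (h0 : 0 < x)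
    (h : hasDigitA (PySem.Int.floordiv x 10) d = true) : hasDigitA x d = true := by
  rw [PySem.Int.floordiv_eq_ediv_of_pos (by omega)] at h
  unfold hasDigitA
  simp [h0, h]

theorem hasDigitA_pos_unfold (x d : Int) (h : 0 < x) :
    hasDigitA x d = ((d == PySem.Int.mod x 10) || hasDigitA (PySem.Int.floordiv x 10) d) := by
  conv_lhs => rw [hasDigitA]
  rw [dif_pos h]
  by_cases hb : (d == PySem.Int.mod x 10) = true
  · rw [if_pos hb, hb, Bool.true_or]
  · rw [if_neg hb, (Bool.not_eq_true _).mp hb, Bool.false_or]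

theorem hasDigitA_neg_unfold (x d : Int) (h : ¬ 0 < x) : hasDigitA x d = false := by
  rw [hasDigitA, dif_neg h]

-- digit d occurs at position i of the natural number x
theorem hasDigitA_of_pos (x d i : Nat) (hq : 0 < x / 10 ^ i) (hm : (x / 10 ^ i) % 10 = d) :
    hasDigitA (x : Int) (d : Int) = true := by
  induction i generalizing x with
  | zero =>
    simp only [pow_zero, Nat.div_one] at hq hm
    exact hasDigitA_base _ _ (by exact_mod_cast hq)
      (by rw [PySem.Int.mod_eq_emod_of_pos (by omega)]; omega)
  | succ i ih =>
    have hx0 : 0 < x := by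
      have := Nat.div_le_self x (10 ^ (i + 1)); omega
    have hdiv : PySem.Int.floordiv (x : Int) 10 = ((x / 10 : Nat) : Int) := by
      rw [PySem.Int.floordiv_eq_ediv_of_pos (by omega)]; omega
    apply hasDigitA_up _ _ (by exact_mod_cast hx0)
    rw [hdiv]
    have hstep : x / 10 / 10 ^ i = x / 10 ^ (i + 1) := by
      rw [Nat.div_div_eq_div_mul, pow_succ, mul_comm]
    exact ih (x / 10) (by rw [hstep]; exact hq) (by rw [hstep]; exact hm)

-- ---- the pandigital family 309 * 10^m (309^5 = 2817036000549 uses all ten digits) ----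
-- digit d occurs at position pos of 309^5 = 2817036000549, hence in 2817036000549 * 10^k
theorem dig309 (k d pos : Nat) (hm : 2817036000549 / 10 ^ pos % 10 = d)
    (hq : 0 < 2817036000549 / 10 ^ pos) :
    hasDigitA ((2817036000549 * 10 ^ k : Nat) : Int) (d : Nat) = true := by
  apply hasDigitA_of_pos _ d (pos + k)
  · rw [pow_add, mul_comm (10 ^ pos) (10 ^ k), ← Nat.div_div_eq_div_mul,
      Nat.mul_div_cancel _ (pow_pos (by norm_num : (0:Nat) < 10) k)]
    exact hq
  · rw [pow_add, mul_comm (10 ^ pos) (10 ^ k), ← Nat.div_div_eq_div_mul,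
      Nat.mul_div_cancel _ (pow_pos (by norm_num : (0:Nat) < 10) k)]
    exact hm

theorem exA_family (m : Nat) : hasPropA ((309 * 10 ^ m : Nat) : Int) = true := by
  have hfifth : (((309 * 10 ^ m : Nat) : Int)) ^ 5 = ((2817036000549 * 10 ^ (5 * m) : Nat) : Int) := by
    push_cast
    rw [mul_pow, ← pow_mul, mul_comm m 5]
    norm_num
  simp only [hasPropA]
  rw [show PySem.List.pyRange 0 10 1 = [0,1,2,3,4,5,6,7,8,9] from by decide]
  simp only [List.all_cons, List.all_nil, Bool.and_eq_true, hfifth]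
  refine ⟨?_, ?_, ?_, ?_, ?_, ?_, ?_, ?_, ?_, ?_, trivial⟩
  · exact_mod_cast dig309 (5 * m) 0 3 (by norm_num) (by norm_num)
  · exact_mod_cast dig309 (5 * m) 1 10 (by norm_num) (by norm_num)
  · exact_mod_cast dig309 (5 * m) 2 12 (by norm_num) (by norm_num)
  · exact_mod_cast dig309 (5 * m) 3 7 (by norm_num) (by norm_num)
  · exact_mod_cast dig309 (5 * m) 4 1 (by norm_num) (by norm_num)
  · exact_mod_cast dig309 (5 * m) 5 2 (by norm_num) (by norm_num)
  · exact_mod_cast dig309 (5 * m) 6 6 (by norm_num) (by norm_num)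
  · exact_mod_cast dig309 (5 * m) 7 9 (by norm_num) (by norm_num)
  · exact_mod_cast dig309 (5 * m) 8 11 (by norm_num) (by norm_num)
  · exact_mod_cast dig309 (5 * m) 9 0 (by norm_num) (by norm_num)

-- ---- B's digit set = the set of digits A's rescans find ----
theorem mem_digitsB (x : Int) (s : PySem.Set Int) (d : Int) :
    d ∈ digitsB x s ↔ d ∈ s ∨ hasDigitA x d = true := by
  fun_induction digitsB x s with
  | case1 x s h ih =>
    rw [ih, PySem.Set.mem_add, hasDigitA_pos_unfold x d h, Bool.or_eq_true, beq_iff_eq]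
    tauto
  | case2 x s h =>
    rw [hasDigitA_neg_unfold x d h]
    simp

theorem nodup_digitsB (x : Int) (s : PySem.Set Int) : s.Nodup → (digitsB x s).Nodup := by
  fun_induction digitsB x s with
  | case1 x s h ih => exact fun hs => ih (PySem.Set.nodup_add s _ hs)
  | case2 x s h => exact fun hs => hs

theorem hasDigitA_bounds (x d : Int) : hasDigitA x d = true → 0 ≤ d ∧ d < 10 := by
  fun_induction hasDigitA x d with
  | case1 x h0 hb =>
    intro _
    rw [beq_iff_eq] at hb
    subst hb
    exact ⟨PySem.Int.mod_nonneg _ (by norm_num), PySem.Int.mod_lt _ (by norm_num)⟩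
  | case2 x h0 hb ih => exact ih
  | case3 x h0 => intro h; cases h

-- a duplicate-free list of integer digits has all ten members iff it has ten members
theorem len10_iff (L : List Int) (hnd : L.Nodup) (hb : ∀ d ∈ L, 0 ≤ d ∧ d < 10) :
    L.length = 10 ↔ ∀ d ∈ ([0,1,2,3,4,5,6,7,8,9] : List Int), d ∈ L := by
  have hsub : L.toFinset ⊆ Finset.Icc (0 : Int) 9 := by
    intro d hd
    rw [List.mem_toFinset] at hd
    rcases hb d hd with ⟨h1, h2⟩
    rw [Finset.mem_Icc]; omega
  have hcardIcc : (Finset.Icc (0 : Int) 9).card = 10 := by decide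
  have hcardL : L.toFinset.card = L.length := List.toFinset_card_of_nodup hnd
  constructor
  · intro hlen d hd
    have heq : L.toFinset = Finset.Icc (0 : Int) 9 :=
      Finset.eq_of_subset_of_card_le hsub (by omega)
    have : d ∈ Finset.Icc (0 : Int) 9 := by
      fin_cases hd <;> decide
    rw [← heq, List.mem_toFinset] at this
    exact this
  · intro hall
    have hsub2 : Finset.Icc (0 : Int) 9 ⊆ L.toFinset := by
      intro d hd
      rw [Finset.mem_Icc] at hd
      rw [List.mem_toFinset]
      have : d = 0 ∨ d = 1 ∨ d = 2 ∨ d = 3 ∨ d = 4 ∨ d = 5 ∨ d = 6 ∨ d = 7 ∨ d = 8 ∨ d = 9 := by omega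
      rcases this with h|h|h|h|h|h|h|h|h|h <;> subst h <;> exact hall _ (by decide)
    have h1 := Finset.card_le_card hsub
    have h2 := Finset.card_le_card hsub2
    omega

theorem hasPropB_eq (g : Int) : hasPropB g = hasPropA g := by
  have hiff : hasPropB g = true ↔ hasPropA g = true := by
    unfold hasPropB
    simp only [hasPropA]
    rw [show PySem.List.pyRange 0 10 1 = [0,1,2,3,4,5,6,7,8,9] from by decide]
    have hmem : ∀ d : Int, d ∈ digitsB (g ^ 5) PySem.Set.empty ↔ hasDigitA (g ^ 5) d = true := by
      intro d
      rw [mem_digitsB]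
      simp [PySem.Set.empty]
    have hlen : (PySem.Set.len (digitsB (g ^ 5) PySem.Set.empty) == (10 : Int)) = true ↔
        (digitsB (g ^ 5) PySem.Set.empty).length = 10 := by
      rw [beq_iff_eq, PySem.Set.len]
      omega
    rw [hlen,
      len10_iff _ (nodup_digitsB _ _ (by simp [PySem.Set.empty]))
        (fun d hd => hasDigitA_bounds _ _ ((hmem d).mp hd)),
      List.all_eq_true]
    constructor
    · intro h d hd
      exact (hmem d).mp (h d hd)
    · intro h d hd
      exact (hmem d).mpr (h d hd)
  cases hA : hasPropA g with
  | true => exact hiff.mpr hA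
  | false =>
    cases hB : hasPropB g with
    | false => rfl
    | true =>
      have := hiff.mp hB
      rw [hA] at this
      cases this

-- ---- the 'next pandigital fifth power at or above s' function (proof-side only) ----
def pA (t : Nat) : Bool := hasPropA (t : Int)

theorem exPA (s : Nat) : ∃ k : Nat, pA (s + k) = true := by
  refine ⟨309 * 10 ^ s - s, ?_⟩
  have h1 : s < 10 ^ s := Nat.lt_pow_self (by norm_num)
  have h2 : 10 ^ s ≤ 309 * 10 ^ s := Nat.le_mul_of_pos_left _ (by omega)
  have h3 : s + (309 * 10 ^ s - s) = 309 * 10 ^ s := by omega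
  rw [h3]
  exact exA_family s

def nextP (s : Nat) : Nat := s + Nat.find (exPA s)

theorem nextP_ge (s : Nat) : s ≤ nextP s := Nat.le_add_right _ _

theorem nextP_self (s : Nat) (h : pA s = true) : nextP s = s := by
  unfold nextP
  have : Nat.find (exPA s) = 0 := by
    rw [Nat.find_eq_zero]
    simpa using h
  omega

theorem nextP_shift (s : Nat) (h : pA s = false) : nextP s = nextP (s + 1) := by
  unfold nextP
  have hspec := Nat.find_spec (exPA s)
  have ha0 : Nat.find (exPA s) ≠ 0 := by
    intro h0
    rw [h0, Nat.add_zero] at hspec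
    rw [hspec] at h
    cases h
  have hle1 : Nat.find (exPA (s + 1)) ≤ Nat.find (exPA s) - 1 := by
    apply Nat.find_le
    have : s + 1 + (Nat.find (exPA s) - 1) = s + Nat.find (exPA s) := by omega
    rw [this]
    exact hspec
  have hle2 : Nat.find (exPA s) ≤ Nat.find (exPA (s + 1)) + 1 := by
    apply Nat.find_le
    have : s + (Nat.find (exPA (s + 1)) + 1) = s + 1 + Nat.find (exPA (s + 1)) := by omega
    rw [this]
    exact Nat.find_spec (exPA (s + 1))
  omega

theorem nextP_le (s : Nat) : nextP s ≤ 10 * s + 309 := by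
  have hex : ∃ m : Nat, s ≤ 309 * 10 ^ m := by
    refine ⟨s, ?_⟩
    have h1 : s < 10 ^ s := Nat.lt_pow_self (by norm_num)
    have h2 : 10 ^ s ≤ 309 * 10 ^ s := Nat.le_mul_of_pos_left _ (by omega)
    omega
  have hM := Nat.find_spec hex
  have hle : nextP s ≤ 309 * 10 ^ Nat.find hex := by
    unfold nextP
    have : s + (309 * 10 ^ Nat.find hex - s) = 309 * 10 ^ Nat.find hex := by omega
    have hfind : Nat.find (exPA s) ≤ 309 * 10 ^ Nat.find hex - s := by
      apply Nat.find_le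
      rw [this]
      exact exA_family _
    omega
  cases hM0 : Nat.find hex with
  | zero => rw [hM0] at hle; simp at hle; omega
  | succ m =>
    have hmin : ¬ s ≤ 309 * 10 ^ m := Nat.find_min hex (by omega)
    rw [hM0, pow_succ] at hle
    have : 309 * (10 ^ m * 10) = 10 * (309 * 10 ^ m) := by ring
    omega

-- ---- B's bounded search computes nextP; the reference iteration R ----
theorem nextFromB_eq (fuel g : Nat) (h : nextP g ≤ g + fuel) : nextFromB g fuel = nextP g := by
  induction fuel generalizing g with
  | zero =>
    have := nextP_ge g
    unfold nextFromB
    omega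
  | succ fuel ih =>
    unfold nextFromB
    rw [hasPropB_eq]
    cases hp : pA g with
    | true =>
      rw [show hasPropA ((g : Nat) : Int) = pA g from rfl, hp, if_pos rfl]
      exact (nextP_self g hp).symm
    | false =>
      rw [show hasPropA ((g : Nat) : Int) = pA g from rfl, hp]
      simp only [Bool.false_eq_true, if_false]
      rw [ih (g + 1) (by rw [← nextP_shift g hp]; omega)]
      exact (nextP_shift g hp).symm

def R : Nat → Nat → Nat
  | 0, g => g
  | k + 1, g => R k (nextP (g + 1))

theorem R_ge (k : Nat) : ∀ g, g ≤ R k g := by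
  induction k with
  | zero => intro g; exact Nat.le_refl g
  | succ k ih =>
    intro g
    have h1 := nextP_ge (g + 1)
    have h2 := ih (nextP (g + 1))
    unfold R
    omega

theorem R_bound (k : Nat) : ∀ g, R k g ≤ 10 ^ k * (g + 36) := by
  induction k with
  | zero => intro g; simp [R]
  | succ k ih =>
    intro g
    have h1 := nextP_le (g + 1)
    have h2 := ih (nextP (g + 1))
    have h3 : 10 ^ k * (nextP (g + 1) + 36) ≤ 10 ^ k * (10 * g + 355) :=
      Nat.mul_le_mul_left _ (by omega)
    have h4 : 10 ^ k * (10 * g + 355) ≤ 10 ^ (k + 1) * (g + 36) := by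
      calc 10 ^ k * (10 * g + 355) ≤ 10 ^ k * (10 * (g + 36)) :=
            Nat.mul_le_mul_left _ (by omega)
      _ = 10 ^ (k + 1) * (g + 36) := by ring
    calc R (k + 1) g = R k (nextP (g + 1)) := rfl
    _ ≤ 10 ^ k * (nextP (g + 1) + 36) := h2
    _ ≤ 10 ^ (k + 1) * (g + 36) := le_trans h3 h4

theorem iterB_eq_R (k : Nat) : ∀ g, iterB k g = R k g := by
  induction k with
  | zero => intro g; rfl
  | succ k ih =>
    intro g
    have hpow : g + 1 < 10 ^ (g + 1) := Nat.lt_pow_self (by norm_num)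
    have hfuel : nextP (g + 1) ≤ (g + 1) + 309 * 10 ^ (g + 1) := by
      have h1 := nextP_le (g + 1)
      have h2 : 309 * (g + 2) ≤ 309 * 10 ^ (g + 1) := Nat.mul_le_mul_left _ (by omega)
      omega
    show iterB k (nextFromB (g + 1) (309 * 10 ^ (g + 1))) = R k (nextP (g + 1))
    rw [nextFromB_eq _ _ hfuel, ih]

-- ---- A's fuelled while-loop computes the same reference iteration ----
theorem loopA_eq_R (n : Int) (fuel : Nat) : ∀ f g : Nat,
    R (n - f + 1).toNat g < g + fuel →
    loopA n f g fuel = ((R (n - f + 1).toNat g : Nat) : Int) := by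
  induction fuel with
  | zero =>
    intro f g hlt
    have := R_ge (n - f + 1).toNat g
    omega
  | succ fuel ih =>
    intro f g hlt
    by_cases h1 : (f : Int) ≤ n
    · have hk : (n - (f : Int) + 1).toNat = (n - ((f + 1 : Nat) : Int) + 1).toNat + 1 := by
        push_cast; omega
      unfold loopA
      rw [if_pos h1]
      set k' := (n - ((f + 1 : Nat) : Int) + 1).toNat with hk'
      have hRg : R (n - (f : Int) + 1).toNat g = R k' (nextP (g + 1)) := by
        rw [hk]; rfl
      cases hp : pA (g + 1) with
      | true =>
        rw [show hasPropA ((g + 1 : Nat) : Int) = pA (g + 1) from rfl, hp, if_pos rfl]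
        have h5 : R k' (nextP (g + 1)) < g + (fuel + 1) := by rw [← hRg]; exact hlt
        rw [nextP_self (g + 1) hp] at h5
        have hgoal : R (n - ((f + 1 : Nat) : Int) + 1).toNat (g + 1) < (g + 1) + fuel := by
          rw [← hk']; omega
        rw [ih (f + 1) (g + 1) hgoal, hRg, nextP_self (g + 1) hp, ← hk']
      | false =>
        rw [show hasPropA ((g + 1 : Nat) : Int) = pA (g + 1) from rfl, hp]
        simp only [Bool.false_eq_true, if_false]
        have hshift : R (n - (f : Int) + 1).toNat (g + 1) = R (n - (f : Int) + 1).toNat g := by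
          rw [hRg, hk]
          show R k' (nextP (g + 1 + 1)) = R k' (nextP (g + 1))
          rw [← nextP_shift (g + 1) hp]
        rw [ih f (g + 1) (by rw [hshift]; omega), hshift]
    · have hk : (n - (f : Int) + 1).toNat = 0 := by omega
      unfold loopA
      rw [if_neg h1, hk]
      rfl

-- ===== VERDICT (by name: the statement is the Claim_ definition above) =====
theorem nth_property_309_spec : Claim_equal_nth_property_309 := by
  intro n _
  unfold Spec_nth_property_309 nth_property_309 nth_property_309_alt
  have hk : (n - (0 : Nat) + 1).toNat = (n + 1).toNat := by omega
  have hfuel : R (n - (0 : Nat) + 1).toNat 0 < 0 + 309 * 10 ^ (n + 1).toNat := by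
    have hb := R_bound (n - (0 : Nat) + 1).toNat 0
    have hp : 0 < 10 ^ (n + 1).toNat := pow_pos (by norm_num) _
    rw [hk] at hb ⊢
    omega
  rw [loopA_eq_R n _ 0 0 hfuel, iterB_eq_R, hk]
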